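-- pv_equiv track=rewrite | github.com/lavishmishra8827/Leetcode_Firebolt7_Decipherings | Biweekly_contest_84/ques1.py | mergeSimilarItems
-- ===== SOURCE A (Python) =====
-- from typing import List
--
-- def mergeSimilarItems(items1: List[List[int]], items2: List[List[int]]) -> List[List[int]]:
--     def updatedict(givenitem,finaldict):
--         for item,value in givenitem:
--             if item not in finaldict:
--                 finaldict[item]=0
--             finaldict[item]+=value
--     finaldict={}
--     updatedict(items1,finaldict)
--     updatedict(items2,finaldict)
--     finalans=[]
--     for key in sorted(finaldict.keys()):
--         finalans.append([key,finaldict[key]])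
--     return finalans
-- ===== SOURCE B (Python) =====
-- from itertools import groupby
--
-- def mergeSimilarItems(items1, items2):
--     pairs = sorted(items1 + items2, key=lambda p: p[0])
--     return [[k, sum(v for _, v in grp)]
--             for k, grp in groupby(pairs, key=lambda p: p[0])]
-- ===== Notes on version B (the rewrite author's own statement) =====
-- stated objective: alternative
-- what changed: B replaces A's dict accumulation plus separate sorted(keys) pass by a single sort of the concatenated pair list followed by one groupby-style scan that sums consecutive equal keys; no dict is maintained.
import Mathlib
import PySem

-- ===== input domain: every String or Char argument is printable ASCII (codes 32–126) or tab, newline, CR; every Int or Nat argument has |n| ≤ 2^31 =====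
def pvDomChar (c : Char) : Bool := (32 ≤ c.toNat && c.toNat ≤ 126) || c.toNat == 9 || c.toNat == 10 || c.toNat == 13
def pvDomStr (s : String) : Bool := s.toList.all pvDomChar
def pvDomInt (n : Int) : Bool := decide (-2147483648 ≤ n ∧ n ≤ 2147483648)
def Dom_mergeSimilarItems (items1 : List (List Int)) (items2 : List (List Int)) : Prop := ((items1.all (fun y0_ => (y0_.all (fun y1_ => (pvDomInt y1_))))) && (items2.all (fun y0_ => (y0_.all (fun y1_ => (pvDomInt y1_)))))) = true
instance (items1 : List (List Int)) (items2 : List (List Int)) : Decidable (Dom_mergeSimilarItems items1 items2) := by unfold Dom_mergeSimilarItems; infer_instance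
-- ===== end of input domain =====

-- B merges the two lists by sorting the concatenation and summing runs of equal keys in one
-- scan (no dict), instead of A's dict accumulation followed by a separate sorted(keys) pass;
-- objective: alternative (same asymptotic cost, different algorithm).

-- ===== PORT A =====
-- A's inner helper 'updatedict': 'for item,value in givenitem' unpacks each element as a pair;
-- the catch-all branch is unreachable under Pre_ (Python raises ValueError there).
def pvUpdatedict (givenitem : List (List Int)) (finaldict : PySem.Dict Int Int) : PySem.Dict Int Int :=
  givenitem.foldl (fun d p =>
    match p with
    | [item, value] =>
        let d := if d.contains item then d else d.insert item 0
        d.insert item (d.getD item 0 + value)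
    | _ => d) finaldict

def mergeSimilarItems (items1 : List (List Int)) (items2 : List (List Int)) : List (List Int) :=
  let finaldict := pvUpdatedict items2 (pvUpdatedict items1 PySem.Dict.empty)
  (PySem.List.sorted finaldict.keys (fun k => k)).foldl
    (fun acc key => acc ++ [[key, finaldict.getD key 0]]) []

-- ===== PORT B =====
-- Source B's groupby over the key-sorted pair list: take the run of the head's key, sum its
-- values, recurse on the rest.  p[0] is p.headI and p[1] is p.getD 1 0 (length 2 under Pre_).
def pvGroupSum : List (List Int) → List (List Int)
  | [] => []
  | p :: rest =>
    [p.headI, ((p :: rest.takeWhile (fun q => q.headI == p.headI)).foldl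
        (fun s q => s + q.getD 1 0) 0)]
      :: pvGroupSum (rest.dropWhile (fun q => q.headI == p.headI))
termination_by l => l.length
decreasing_by
  simpa using Nat.lt_succ_of_le (List.dropWhile_sublist _).length_le

def mergeSimilarItems_alt (items1 : List (List Int)) (items2 : List (List Int)) : List (List Int) :=
  pvGroupSum (PySem.List.sorted (items1 ++ items2) (fun p => p.headI))

-- ===== PRECONDITION & SPEC =====
-- Pre_ excludes exactly the inputs on which Python A raises ValueError: an element that is not
-- a [key, value] pair of length 2 (the 'for item,value in …' unpacking fails there).
def Pre_mergeSimilarItems (items1 : List (List Int)) (items2 : List (List Int)) : Prop :=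
  (∀ p ∈ items1, p.length = 2) ∧ (∀ p ∈ items2, p.length = 2)
instance (items1 : List (List Int)) (items2 : List (List Int)) : Decidable (Pre_mergeSimilarItems items1 items2) := by unfold Pre_mergeSimilarItems; infer_instance
def pvWitness_mergeSimilarItems : List (List Int) × List (List Int) := ([[1, 2], [1, 3]], [[0, 5]])
def Spec_mergeSimilarItems (items1 : List (List Int)) (items2 : List (List Int)) (out : List (List Int)) : Prop := out = mergeSimilarItems_alt items1 items2
instance (items1 : List (List Int)) (items2 : List (List Int)) (out : List (List Int)) : Decidable (Spec_mergeSimilarItems items1 items2 out) := by unfold Spec_mergeSimilarItems; infer_instance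

-- ===== CLAIM (what is proved, stated in full; the proofs are below) =====
def Claim_equal_mergeSimilarItems : Prop := ∀ (items1 : List (List Int)) (items2 : List (List Int)), Dom_mergeSimilarItems items1 items2 → Pre_mergeSimilarItems items1 items2 → Spec_mergeSimilarItems items1 items2 (mergeSimilarItems items1 items2)

-- ===== LEMMAS AND PROOFS =====

-- value of pair p, and the total value attached to key k in ps
def pvVal (p : List Int) : Int := p.getD 1 0
def pvSum (ps : List (List Int)) (k : Int) : Int :=
  ((ps.filter (fun p => p.headI == k)).map pvVal).sum

lemma updatedict_eq (ps : List (List Int)) (d : PySem.Dict Int Int)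
    (h : ∀ p ∈ ps, p.length = 2) :
    pvUpdatedict ps d
      = ps.foldl (fun d p => d.insert p.headI (d.getD p.headI 0 + pvVal p)) d := by
  unfold pvUpdatedict
  apply PySem.List.foldl_congr_mem
  intro acc p hp
  obtain ⟨a, b, rfl⟩ := List.length_eq_two.mp (h p hp)
  by_cases hc : acc.contains a = true
  · simp [hc, pvVal]
  · simp only [Bool.not_eq_true] at hc
    simp [hc, PySem.Dict.insert_insert_self, PySem.Dict.getD_insert_self,
      PySem.Dict.getD_of_not_contains _ _ hc, pvVal]

lemma getD_insertfold (ps : List (List Int)) (d : PySem.Dict Int Int) (k : Int) :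
    (ps.foldl (fun d p => d.insert p.headI (d.getD p.headI 0 + pvVal p)) d).getD k 0
      = d.getD k 0 + pvSum ps k := by
  induction ps generalizing d with
  | nil => simp [pvSum]
  | cons p t ih =>
    simp only [List.foldl_cons, ih, pvSum, List.filter_cons]
    by_cases hk : p.headI = k
    · simp [hk]
      ring
    · have : (p.headI == k) = false := by simpa using hk
      simp [this, PySem.Dict.getD_insert, Ne.symm hk]

lemma foldl_add_cons (ys : List Int) (k : Int) (s : List Int) (hy : k ∉ ys) :
    ys.foldl PySem.Set.add (k :: s) = k :: ys.foldl PySem.Set.add s := by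
  induction ys generalizing s with
  | nil => rfl
  | cons y t ih =>
    have hyk : y ≠ k := fun h => hy (by simp [h])
    have ht : k ∉ t := fun h => hy (by simp [h])
    have hcons : PySem.Set.add (k :: s) y = k :: PySem.Set.add s y := by
      by_cases hm : y ∈ s <;> simp [PySem.Set.add, PySem.Set.contains, hyk, hm]
    rw [List.foldl_cons, List.foldl_cons, hcons]
    exact ih _ ht

lemma ofList_run (k : Int) (xs ys : List Int)
    (hx : ∀ x ∈ xs, x = k) (hy : k ∉ ys) :
    PySem.Set.ofList (k :: (xs ++ ys)) = k :: PySem.Set.ofList ys := by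
  rw [PySem.Set.ofList_eq_foldl, PySem.Set.ofList_eq_foldl]
  have h1 : (List.foldl PySem.Set.add [] [k]) = [k] := rfl
  have hxs : xs.foldl PySem.Set.add [k] = [k] := by
    induction xs with
    | nil => rfl
    | cons x t ih =>
      have hx' : x = k := hx x (by simp)
      have : PySem.Set.add [k] x = [k] := by
        simp [PySem.Set.add, PySem.Set.contains, hx']
      simp only [List.foldl_cons, this]
      exact ih (fun x hxt => hx x (by simp [hxt]))
  calc List.foldl PySem.Set.add [] (k :: (xs ++ ys))
      = List.foldl PySem.Set.add [k] (xs ++ ys) := rfl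
    _ = List.foldl PySem.Set.add [k] ys := by rw [List.foldl_append, hxs]
    _ = k :: List.foldl PySem.Set.add [] ys := foldl_add_cons ys k [] hy

lemma ofList_sublist {α : Type} [BEq α] (xs : List α) :
    (PySem.Set.ofList xs).Sublist xs := by
  rw [PySem.Set.ofList_eq_foldl]
  suffices h : ∀ (xs : List α) (s : List α), ∃ t, xs.foldl PySem.Set.add s = s ++ t ∧ t.Sublist xs by
    obtain ⟨t, ht, hs⟩ := h xs []
    simpa [ht] using hs
  intro xs
  induction xs with
  | nil => exact fun s => ⟨[], by simp⟩
  | cons x t ih =>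
    intro s
    by_cases hc : s.contains x = true
    · have hadd : PySem.Set.add s x = s := by simp [PySem.Set.add, PySem.Set.contains, hc]
      obtain ⟨u, hu, hs⟩ := ih s
      exact ⟨u, by rw [List.foldl_cons, hadd, hu], hs.cons x⟩
    · have hadd : PySem.Set.add s x = s ++ [x] := by simp [PySem.Set.add, PySem.Set.contains, hc]
      obtain ⟨u, hu, hs⟩ := ih (s ++ [x])
      exact ⟨x :: u, by rw [List.foldl_cons, hadd, hu]; simp, hs.cons₂ x⟩

lemma groupSum_sorted : ∀ (n : Nat) (l : List (List Int)), l.length ≤ n →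
    l.Pairwise (fun a b => a.headI ≤ b.headI) →
    pvGroupSum l = (PySem.Set.ofList (l.map List.headI)).map (fun k => [k, pvSum l k]) := by
  intro n
  induction n with
  | zero =>
    intro l hl _
    have : l = [] := List.eq_nil_of_length_eq_zero (Nat.le_zero.mp hl)
    subst this; simp [pvGroupSum]
  | succ n ih =>
    intro l hl hs
    match l with
    | [] => simp [pvGroupSum]
    | p :: rest =>
      have hpw := List.pairwise_cons.mp hs
      set k := p.headI with hk
      set run := rest.takeWhile (fun q => q.headI == k) with hrun
      set tail := rest.dropWhile (fun q => q.headI == k) with htail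
      have hsplit : run ++ tail = rest := List.takeWhile_append_dropWhile
      have hrunk : ∀ q ∈ run, q.headI = k := by
        intro q hq
        simpa using List.mem_takeWhile_imp hq
      have htailmem : ∀ q ∈ tail, q ∈ rest := fun q hq => (List.dropWhile_sublist _).mem hq
      have htailpw : tail.Pairwise (fun a b => a.headI ≤ b.headI) :=
        hpw.2.sublist (List.dropWhile_sublist _)
      have hknot : ∀ q ∈ tail, q.headI ≠ k := by
        intro q hq
        match htl : tail with
        | [] => simp [htl] at hq
        | t0 :: tt =>
          have h0 : (t0.headI == k) = false := by
            have := List.head?_dropWhile_not (fun q => q.headI == k) rest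
            rw [← htail, htl] at this; simpa using this
          have hkt0 : k < t0.headI :=
            lt_of_le_of_ne (hpw.1 t0 (htailmem t0 (by simp [htl])))
              (Ne.symm (by simpa using h0))
          rw [htl] at hq
          rcases List.mem_cons.mp hq with rfl | hq'
          · exact ne_of_gt hkt0
          · have : t0.headI ≤ q.headI := by
              have := List.pairwise_cons.mp (htl ▸ htailpw)
              exact this.1 q hq'
            exact ne_of_gt (lt_of_lt_of_le hkt0 this)
      have hknotm : k ∉ tail.map List.headI := by
        simp only [List.mem_map, not_exists, not_and]
        intro q hq h; exact hknot q hq h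
      have hlen : tail.length ≤ n := by
        have h := (List.dropWhile_sublist (l := rest) (fun q => q.headI == k)).length_le
        rw [← htail] at h
        simp only [List.length_cons] at hl; omega
      -- one unfold of pvGroupSum
      have hstep : pvGroupSum (p :: rest)
          = [k, ((p :: run).foldl (fun s q => s + q.getD 1 0) 0)] :: pvGroupSum tail := by
        rw [pvGroupSum]
      rw [hstep, ih tail hlen htailpw]
      -- keys
      have hkeys : PySem.Set.ofList ((p :: rest).map List.headI)
          = k :: PySem.Set.ofList (tail.map List.headI) := by
        have : (p :: rest).map List.headI = k :: (run.map List.headI ++ tail.map List.headI) := by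
          rw [← hsplit]; simp [← hk]
        rw [this]
        exact ofList_run k _ _ (by
          intro x hx
          obtain ⟨q, hq, rfl⟩ := List.mem_map.mp hx
          exact hrunk q hq) hknotm
      rw [hkeys, List.map_cons]
      -- head entry
      have hfilter : (p :: rest).filter (fun q => q.headI == k) = p :: run := by
        have h1 : run.filter (fun q => q.headI == k) = run :=
          List.filter_eq_self.mpr (fun q hq => by simpa using hrunk q hq)
        have h2 : tail.filter (fun q => q.headI == k) = [] :=
          List.filter_eq_nil_iff.mpr (fun q hq => by simpa using hknot q hq)
        rw [← hsplit]
        simp only [List.filter_cons, List.filter_append, h1, h2]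
        simp [← hk]
      have hsum : ((p :: run).foldl (fun s q => s + q.getD 1 0) 0) = pvSum (p :: rest) k := by
        have := PySem.List.foldl_add (p :: run) (fun q => q.getD 1 0) 0
        simp only [pvSum, hfilter]
        simpa using this
      rw [hsum]
      -- tail entries: pvSum over the whole list agrees with pvSum over the tail
      congr 1
      apply List.map_congr_left
      intro k' hk'
      have hk'mem : k' ∈ tail.map List.headI := (PySem.Set.mem_ofList _ _).mp hk'
      have hk'ne : k' ≠ k := fun h => hknotm (h ▸ hk'mem)
      have : pvSum (p :: rest) k' = pvSum tail k' := by
        have hpne : (p.headI == k') = false := by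
          simp only [← hk]; simpa using fun h => hk'ne h.symm
        have h1 : run.filter (fun q => q.headI == k') = [] :=
          List.filter_eq_nil_iff.mpr (fun q hq => by
            simp [hrunk q hq]; exact fun h => hk'ne h.symm)
        simp [pvSum, ← hsplit, List.filter_append, h1, hpne]
      rw [this]

-- ===== VERDICT (by name: the statement is the Claim_ definition above) =====
theorem mergeSimilarItems_spec : Claim_equal_mergeSimilarItems := by
  intro items1 items2 _ hpre
  unfold Spec_mergeSimilarItems mergeSimilarItems mergeSimilarItems_alt
  obtain ⟨h1, h2⟩ := hpre
  set ps := items1 ++ items2 with hps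
  -- A's dict is the insert-fold over the concatenation
  have hupd : pvUpdatedict items2 (pvUpdatedict items1 PySem.Dict.empty)
      = ps.foldl (fun d p => d.insert p.headI (d.getD p.headI 0 + pvVal p)) PySem.Dict.empty := by
    rw [updatedict_eq items1 _ h1, updatedict_eq items2 _ h2, hps, List.foldl_append]
  set d := ps.foldl (fun d p => d.insert p.headI (d.getD p.headI 0 + pvVal p)) PySem.Dict.empty with hd
  have hkeys : d.keys = PySem.Set.ofList (ps.map List.headI) := by
    rw [hd, PySem.Dict.keys_foldl_insert_key ps List.headI
      (fun d p => d.getD p.headI 0 + pvVal p) PySem.Dict.empty]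
    rfl
  have hgetD : ∀ k, d.getD k 0 = pvSum ps k := by
    intro k
    rw [hd, getD_insertfold]
    simp
  -- B's side
  set sps := PySem.List.sorted ps (fun p => p.headI) with hsps
  have hperm : sps.Perm ps := PySem.List.sorted_perm ps (fun p => p.headI) false
  have hBpw : sps.Pairwise (fun a b => a.headI ≤ b.headI) :=
    PySem.List.sorted_pairwise ps (fun p => p.headI)
  have hB : pvGroupSum sps
      = (PySem.Set.ofList (sps.map List.headI)).map (fun k => [k, pvSum sps k]) :=
    groupSum_sorted sps.length sps le_rfl hBpw
  -- sorted distinct keys coincide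
  have hkperm : (PySem.Set.ofList (sps.map List.headI)).Perm
      (PySem.Set.ofList (ps.map List.headI)) := by
    apply (List.perm_ext_iff_of_nodup (PySem.Set.nodup_ofList _) (PySem.Set.nodup_ofList _)).mpr
    intro k
    simp only [PySem.Set.mem_ofList, List.mem_map]
    constructor
    · rintro ⟨q, hq, rfl⟩; exact ⟨q, hperm.mem_iff.mp hq, rfl⟩
    · rintro ⟨q, hq, rfl⟩; exact ⟨q, hperm.mem_iff.mpr hq, rfl⟩
  have hklt : (PySem.Set.ofList (sps.map List.headI)).Pairwise (fun a b => a < b) := by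
    have hle : (PySem.Set.ofList (sps.map List.headI)).Pairwise (fun a b => a ≤ b) :=
      (PySem.List.sorted_map_key_pairwise ps (fun p => p.headI)).sublist (ofList_sublist _)
    have hne : (PySem.Set.ofList (sps.map List.headI)).Pairwise (fun a b => a ≠ b) :=
      PySem.Set.nodup_ofList _
    exact (hle.and hne).imp (fun h => lt_of_le_of_ne h.1 h.2)
  have hsortkeys : PySem.List.sorted (PySem.Set.ofList (ps.map List.headI)) (fun k => k)
      = PySem.Set.ofList (sps.map List.headI) :=
    PySem.List.sorted_eq_of_perm_of_pairwise_lt _ _ _ hkperm hklt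
  have hsumeq : ∀ k, pvSum sps k = pvSum ps k := by
    intro k
    exact ((hperm.filter _).map pvVal).sum_eq
  -- put everything together
  rw [hupd]
  show (PySem.List.sorted d.keys (fun k => k)).foldl
      (fun acc key => acc ++ [[key, d.getD key 0]]) [] = pvGroupSum sps
  rw [hkeys, hsortkeys, hB, PySem.List.foldl_append_singleton_eq_map]
  simp only [List.nil_append]
  apply List.map_congr_left
  intro k _
  rw [hgetD k, hsumeq k]
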